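-- pv_equiv track=rewrite | github.com/isoundy000/learn_python | learn_tu_you/wx_superboss/trunk/hall37-newfish/src/newfish/entity/mini_game.py | _rewardLen
-- ===== SOURCE A (Python) =====
-- def _rewardLen(reward):
--     """
--     计算包含两个女巫奖励的最短长度
--     num3：奖励为女巫的数量
--     """
--     num3, i = 0, 0
--     for i in range(len(reward)):
--         if reward[i] == 3:
--             num3 += 1
--             if num3 == 2:
--                 break
--     return i + 1
-- ===== SOURCE B (Python) =====
-- def _rewardLen(reward):
--     idxs = [i for i, v in enumerate(reward) if v == 3]
--     if len(idxs) >= 2: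
--         return idxs[1] + 1
--     return len(reward)
-- ===== Notes on version B (the rewrite author's own statement) =====
-- stated objective: simpler
-- what changed: Replaces the streaming counter-with-break loop by gathering all positions of value 3 once and selecting the second one, falling back to the list length.
-- intended difference: On the empty list A returns 1 (the leftover initial value of the loop variable i plus one), while B returns 0, the list's length, which is the intended 'shortest length' of an empty reward list. — e.g. on _rewardLen([]): A returns 1, B returns 0
import Mathlib
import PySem

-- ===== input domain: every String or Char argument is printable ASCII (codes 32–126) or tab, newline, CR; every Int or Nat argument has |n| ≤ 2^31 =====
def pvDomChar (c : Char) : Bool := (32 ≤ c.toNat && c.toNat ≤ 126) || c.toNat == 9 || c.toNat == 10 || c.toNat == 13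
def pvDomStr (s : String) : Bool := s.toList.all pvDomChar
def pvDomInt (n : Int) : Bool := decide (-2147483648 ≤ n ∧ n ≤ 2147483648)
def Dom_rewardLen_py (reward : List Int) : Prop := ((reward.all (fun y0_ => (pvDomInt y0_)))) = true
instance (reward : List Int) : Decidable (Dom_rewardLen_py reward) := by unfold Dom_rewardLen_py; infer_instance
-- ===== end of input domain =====

-- B gathers all positions of value 3 and selects the second (falling back to the length); A streams a counter with an early break.
-- Intended difference: on the empty list A returns 1 (leftover loop variable), B returns 0 (the length).


-- ===== PORT A =====
-- the for-loop over range(len(reward)) as structural recursion; state = (num3, i),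
-- j is the upcoming loop index; 'break' = returning i + 1 immediately
def rewardLenGo (xs : List Int) (num3 : Int) (i : Int) (j : Int) : Int :=
  match xs with
  | [] => i + 1
  | v :: rest =>
      if v == 3 then
        if num3 + 1 == 2 then j + 1
        else rewardLenGo rest (num3 + 1) j (j + 1)
      else rewardLenGo rest num3 j (j + 1)

def rewardLen_py (reward : List Int) : Int := rewardLenGo reward 0 0 0

-- ===== PORT B =====
def rewardLen_py_alt (reward : List Int) : Int :=
  let idxs := (PySem.List.enumerate reward 0).filterMap
    (fun p => if p.2 == 3 then some p.1 else none)
  if idxs.length ≥ 2 then PySem.List.pyGetD idxs 1 0 + 1 else (reward.length : Int)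

-- ===== PRECONDITION & SPEC =====
-- On the empty list A returns 1 (the loop never runs and i keeps its initial 0), while B
-- returns 0, the list's length, the intended 'shortest length' for an empty reward list.
def D_rewardLen_py (reward : List Int) : Prop := reward = []
instance (reward : List Int) : Decidable (D_rewardLen_py reward) := by unfold D_rewardLen_py; infer_instance
def Spec_rewardLen_py (reward : List Int) (out : Int) : Prop := ¬ D_rewardLen_py reward → out = rewardLen_py_alt reward
instance (reward : List Int) (out : Int) : Decidable (Spec_rewardLen_py reward out) := by unfold Spec_rewardLen_py; infer_instance
def pvDiffWitness_rewardLen_py : List Int := []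
def pvDiffWitnessOut_rewardLen_py : Int × Int := (1, 0)

-- ===== CLAIM (what is proved, stated in full; the proofs are below) =====
def Claim_unchanged_rewardLen_py : Prop := ∀ (reward : List Int), Dom_rewardLen_py reward → Spec_rewardLen_py reward (rewardLen_py reward)
def Claim_changed_rewardLen_py : Prop := Dom_rewardLen_py (pvDiffWitness_rewardLen_py) ∧ D_rewardLen_py (pvDiffWitness_rewardLen_py) ∧ rewardLen_py (pvDiffWitness_rewardLen_py) = pvDiffWitnessOut_rewardLen_py.1 ∧ rewardLen_py_alt (pvDiffWitness_rewardLen_py) = pvDiffWitnessOut_rewardLen_py.2 ∧ pvDiffWitnessOut_rewardLen_py.1 ≠ pvDiffWitnessOut_rewardLen_py.2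
def Claim_exact_rewardLen_py : Prop := ∀ (reward : List Int), Dom_rewardLen_py reward → D_rewardLen_py reward → rewardLen_py reward ≠ rewardLen_py_alt reward

-- ===== LEMMAS AND PROOFS =====

-- the list of positions of value 3, starting the numbering at s (B's comprehension)
def idxs3 (xs : List Int) (s : Int) : List Int :=
  (PySem.List.enumerate xs s).filterMap (fun p => if p.2 == 3 then some p.1 else none)

theorem idxs3_nil (s : Int) : idxs3 [] s = [] := rfl

theorem go_cons (v : Int) (rest : List Int) (num3 i j : Int) :
    rewardLenGo (v :: rest) num3 i j =
      if v == 3 then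
        if num3 + 1 == 2 then j + 1 else rewardLenGo rest (num3 + 1) j (j + 1)
      else rewardLenGo rest num3 j (j + 1) := rfl

theorem idxs3_cons (v : Int) (rest : List Int) (s : Int) :
    idxs3 (v :: rest) s = if v = 3 then s :: idxs3 rest (s + 1) else idxs3 rest (s + 1) := by
  simp [idxs3, PySem.List.enumerate_cons, List.filterMap_cons]
  split_ifs <;> simp_all

-- A's loop with one 3 already seen: first further 3 at position k ↦ k + 1, else j + length
theorem go_one (xs : List Int) : ∀ (i j : Int), xs ≠ [] →
    rewardLenGo xs 1 i j =
      (match idxs3 xs j with | k :: _ => k + 1 | [] => j + xs.length) := by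
  induction xs with
  | nil => intro i j h; exact absurd rfl h
  | cons v rest ih =>
    intro i j _
    by_cases hv : v = 3
    · subst hv; simp [rewardLenGo, idxs3_cons]
    · rcases List.eq_nil_or_concat' rest with hr | ⟨_, _, hr⟩
      · subst hr; simp [rewardLenGo, idxs3_cons, hv, idxs3_nil]
      · have hne : rest ≠ [] := by subst hr; simp
        rw [go_cons, if_neg (by simpa using hv), idxs3_cons, if_neg hv, ih j (j + 1) hne]
        cases idxs3 rest (j + 1) <;> simp <;> push_cast <;> ring

-- A's loop from the initial state: second 3 at position k ↦ k + 1, else j + length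
theorem go_zero (xs : List Int) : ∀ (i j : Int), xs ≠ [] →
    rewardLenGo xs 0 i j =
      (match idxs3 xs j with | _ :: k :: _ => k + 1 | _ => j + xs.length) := by
  induction xs with
  | nil => intro i j h; exact absurd rfl h
  | cons v rest ih =>
    intro i j _
    rcases List.eq_nil_or_concat' rest with hr | ⟨_, _, hr⟩
    · subst hr
      by_cases hv : v = 3 <;> simp [rewardLenGo, idxs3_cons, hv, idxs3_nil]
    · have hne : rest ≠ [] := by subst hr; simp
      by_cases hv : v = 3
      · subst hv
        rw [go_cons, if_pos (by decide), if_neg (by decide), idxs3_cons, if_pos rfl, show (0:Int) + 1 = 1 from rfl,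
          go_one rest j (j + 1) hne]
        cases idxs3 rest (j + 1) <;> simp <;> push_cast <;> ring
      · rw [go_cons, if_neg (by simpa using hv), idxs3_cons, if_neg hv, ih j (j + 1) hne]
        cases idxs3 rest (j + 1) <;> simp <;> push_cast <;> ring

theorem alt_eq (reward : List Int) :
    rewardLen_py_alt reward =
      (match idxs3 reward 0 with | _ :: k :: _ => k + 1 | _ => (reward.length : Int)) := by
  show (if (idxs3 reward 0).length ≥ 2 then PySem.List.pyGetD (idxs3 reward 0) 1 0 + 1
        else (reward.length : Int)) = _
  cases h : idxs3 reward 0 with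
  | nil => simp
  | cons a t =>
    cases t with
    | nil => simp
    | cons b t' => simp [PySem.List.pyGetD, PySem.List.pyGet?, PySem.List.pyIdx?]

-- ===== VERDICT (by name: the statement is the Claim_ definition above) =====
theorem rewardLen_py_spec : Claim_unchanged_rewardLen_py := by
  intro reward _ hD
  have hne : reward ≠ [] := hD
  show rewardLen_py reward = rewardLen_py_alt reward
  rw [alt_eq, show rewardLen_py reward = rewardLenGo reward 0 0 0 from rfl,
    go_zero reward 0 0 hne]
  cases idxs3 reward 0 with
  | nil => simp
  | cons a t => cases t <;> simp

theorem rewardLen_py_changed : Claim_changed_rewardLen_py := by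
  unfold Claim_changed_rewardLen_py; decide

theorem rewardLen_py_tight : Claim_exact_rewardLen_py := by
  intro reward _ hD
  subst hD; decide
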